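-- pv_equiv track=rewrite | github.com/shenpai35/bookbot | main.py | check_alpha
-- ===== SOURCE A (Python) =====
-- def check_alpha(text):
--     chars = {}
--     for word in text:
--         lowered = word.lower()
--         if lowered.isalpha():
--             if lowered in chars:
--                 chars[lowered] += 1
--             else:
--                 chars[lowered] = 1
--     return chars
-- ===== SOURCE B (Python) =====
-- def check_alpha(text):
--     letters = [c.lower() for c in text if c.lower().isalpha()]
--     seen = []
--     for c in letters:
--         if c not in seen:
--             seen.append(c)
--     return {c: letters.count(c) for c in seen}
-- ===== Notes on version B (the rewrite author's own statement) =====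
-- stated objective: alternative
-- what changed: Replaces the incremental dict tally with a two-phase plan: build the filtered lowercase-letter list once, collect its distinct letters in first-occurrence order, then count each distinct letter with list.count.
import Mathlib
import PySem

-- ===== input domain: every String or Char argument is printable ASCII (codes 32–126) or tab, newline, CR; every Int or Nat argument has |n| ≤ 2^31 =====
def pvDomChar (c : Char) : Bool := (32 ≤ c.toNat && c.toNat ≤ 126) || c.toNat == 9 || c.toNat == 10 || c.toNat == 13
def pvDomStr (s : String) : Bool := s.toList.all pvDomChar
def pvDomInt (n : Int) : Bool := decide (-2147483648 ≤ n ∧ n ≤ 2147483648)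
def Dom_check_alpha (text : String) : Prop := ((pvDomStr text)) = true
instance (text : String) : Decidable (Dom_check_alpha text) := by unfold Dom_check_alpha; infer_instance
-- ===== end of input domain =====

-- B replaces A's incremental dict tally with a two-phase plan (filter+lower once, dedup
-- in first-occurrence order, count each distinct letter); alternative decomposition, same results.

-- ===== PORT A =====
def check_alpha (text : String) : List (String × Int) :=
  (text.toList.foldl (fun chars word =>
      let lowered := PySem.Str.lower (String.singleton word)
      if PySem.Str.strIsalpha lowered then
        if chars.contains lowered then
          chars.insert lowered (chars.getD lowered 0 + 1)
        else
          chars.insert lowered 1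
      else chars) PySem.Dict.empty).items

-- ===== PORT B =====
def check_alpha_alt (text : String) : List (String × Int) :=
  let letters := (text.toList.map (fun c => PySem.Str.lower (String.singleton c))).filter
      (fun l => PySem.Str.strIsalpha l)
  let seen := letters.foldl (fun seen c => if seen.contains c then seen else seen ++ [c]) []
  seen.map (fun c => (c, (letters.count c : Int)))

-- ===== PRECONDITION & SPEC =====
def Spec_check_alpha (text : String) (out : List (String × Int)) : Prop := out = check_alpha_alt text
instance (text : String) (out : List (String × Int)) : Decidable (Spec_check_alpha text out) := by unfold Spec_check_alpha; infer_instance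

-- ===== CLAIM (what is proved, stated in full; the proofs are below) =====
def Claim_equal_check_alpha : Prop := ∀ (text : String), Dom_check_alpha text → Spec_check_alpha text (check_alpha text)

-- ===== LEMMAS AND PROOFS =====

-- A's loop, which filters inline, is the counter-step fold over the filtered mapped list.
theorem foldl_filter_map {α β γ : Type} (g : γ → β → γ) (f : α → β) (p : β → Bool)
    (l : List α) (d : γ) :
    l.foldl (fun acc x => if p (f x) then g acc (f x) else acc) d
      = ((l.map f).filter p).foldl g d := by
  induction l generalizing d with
  | nil => rfl
  | cons x xs ih =>
    simp only [List.foldl_cons, List.map_cons, List.filter_cons]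
    by_cases h : p (f x) = true
    · simp [h, ih]
    · simp [h, ih]

-- A's two-branch update is the single insert-getD+1 counter step.
theorem step_eq (chars : PySem.Dict String Int) (l : String) :
    (if chars.contains l then chars.insert l (chars.getD l 0 + 1) else chars.insert l 1)
      = chars.insert l (chars.getD l 0 + 1) := by
  by_cases h : chars.contains l = true
  · simp [h]
  · have h0 : chars.getD l 0 = 0 := PySem.Dict.getD_of_not_contains (h := by simpa using h) (d0 := 0)
    simp [h, h0]

-- B's "seen" loop is ordered dedup, i.e. Set.ofList.
theorem seen_eq_ofList {α : Type} [BEq α] (l : List α) :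
    l.foldl (fun seen c => if seen.contains c then seen else seen ++ [c]) []
      = PySem.Set.ofList l := by
  rw [PySem.Set.ofList_eq_foldl]
  rfl

-- ===== VERDICT (by name: the statement is the Claim_ definition above) =====
theorem check_alpha_spec : Claim_equal_check_alpha := by
  intro text _
  unfold Spec_check_alpha
  have hbody : (fun (chars : PySem.Dict String Int) (word : Char) =>
      if PySem.Str.strIsalpha (PySem.Str.lower (String.singleton word)) then
        if chars.contains (PySem.Str.lower (String.singleton word)) then
          chars.insert (PySem.Str.lower (String.singleton word))
            (chars.getD (PySem.Str.lower (String.singleton word)) 0 + 1)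
        else chars.insert (PySem.Str.lower (String.singleton word)) 1
      else chars)
      = fun chars word =>
        if PySem.Str.strIsalpha (PySem.Str.lower (String.singleton word)) then
          chars.insert (PySem.Str.lower (String.singleton word))
            (chars.getD (PySem.Str.lower (String.singleton word)) 0 + 1)
        else chars := by
    funext chars word
    by_cases hp : PySem.Str.strIsalpha (PySem.Str.lower (String.singleton word)) = true
    · simp only [if_pos hp]; exact step_eq chars _
    · simp only [if_neg hp]
  have hA : check_alpha text =
      (text.toList.foldl (fun chars word =>
          if PySem.Str.strIsalpha (PySem.Str.lower (String.singleton word)) then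
            chars.insert (PySem.Str.lower (String.singleton word))
              (chars.getD (PySem.Str.lower (String.singleton word)) 0 + 1)
          else chars) PySem.Dict.empty).items := by
    show (text.toList.foldl _ PySem.Dict.empty).items = _
    rw [hbody]
  have hB : check_alpha_alt text =
      (((text.toList.map (fun c => PySem.Str.lower (String.singleton c))).filter
            (fun l => PySem.Str.strIsalpha l)).foldl
          (fun seen c => if seen.contains c then seen else seen ++ [c]) []).map
        (fun c => (c, (((text.toList.map (fun c => PySem.Str.lower (String.singleton c))).filter
            (fun l => PySem.Str.strIsalpha l)).count c : Int))) := rfl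
  rw [hA, hB, seen_eq_ofList,
    foldl_filter_map (fun (d : PySem.Dict String Int) (x : String) => d.insert x (d.getD x 0 + 1))
      (fun c => PySem.Str.lower (String.singleton c)) (fun l => PySem.Str.strIsalpha l),
    PySem.Dict.foldl_insert_getD_add_one_eq_counter, PySem.Dict.items_counter]
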